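-- pv_equiv track=rewrite | github.com/ErikSCF/Raq.Ai | src/doc-gen/team_runner.py | _extract_agent_flow
-- ===== SOURCE A (Python) =====
-- def _extract_agent_flow(steps_content: str) -> str:
--     """Extract agent interaction flow from conversation steps."""
--     if not steps_content:
--         return "No conversation steps found"
--
--     lines = steps_content.split('\n')
--     agent_interactions = []
--     current_section = None
--     current_content = []
--
--     # Look for section markers and agent interactions
--     for line in lines:
--         # Check for section markers
--         if line.strip().startswith('<!--- SECTION:') and line.strip().endswith('--->'):
--             if current_section and current_content:
--                 # Save previous section
--                 content_summary = ' '.join(current_content)[:200] + "..." if len(' '.join(current_content)) > 200 else ' '.join(current_content)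
--                 agent_interactions.append(f"{current_section}: {content_summary}")
--
--             # Start new section
--             current_section = line.strip()[14:-4].strip()  # Remove <!--- SECTION: and --->
--             current_content = []
--         elif line.strip().startswith('<!--- END SECTION:'):
--             # End current section
--             if current_section and current_content:
--                 content_summary = ' '.join(current_content)[:200] + "..." if len(' '.join(current_content)) > 200 else ' '.join(current_content)
--                 agent_interactions.append(f"{current_section}: {content_summary}")
--             current_section = None
--             current_content = []
--         elif current_section and line.strip():
--             # Add content to current section
--             current_content.append(line.strip())
--
--     # Handle any remaining section
--     if current_section and current_content:
--         content_summary = ' '.join(current_content)[:200] + "..." if len(' '.join(current_content)) > 200 else ' '.join(current_content)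
--         agent_interactions.append(f"{current_section}: {content_summary}")
--
--     if agent_interactions:
--         return '\n'.join(agent_interactions)
--     else:
--         # Fallback to truncated raw content
--         if len(steps_content) > 1500:
--             return steps_content[:1500] + "\n\n[Content truncated for context efficiency...]"
--         return steps_content
-- ===== SOURCE B (Python) =====
-- def _extract_agent_flow(steps_content: str) -> str:
--     """Extract agent interaction flow from conversation steps."""
--     if not steps_content:
--         return "No conversation steps found"
--
--     def is_section(l):
--         return l.startswith('<!--- SECTION:') and l.endswith('--->')
--
--     def is_marker(l):
--         return is_section(l) or l.startswith('<!--- END SECTION:')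
--
--     # Marker-to-marker jump scan over the pre-stripped lines: locate each SECTION
--     # header, scan ahead to the next marker, and render that slice directly.
--     lines = [l.strip() for l in steps_content.split('\n')]
--     n = len(lines)
--     parts = []
--     i = 0
--     while i < n:
--         if not is_section(lines[i]):
--             i += 1
--             continue
--         name = lines[i][14:-4].strip()
--         j = i + 1
--         while j < n and not is_marker(lines[j]):
--             j += 1
--         body_lines = [c for c in lines[i + 1:j] if c]
--         if name and body_lines:
--             body = ' '.join(body_lines)
--             parts.append(name + ': ' + (body[:200] + '...' if len(body) > 200 else body))
--         i = j
--
--     if parts: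
--         return '\n'.join(parts)
--     if len(steps_content) > 1500:
--         return steps_content[:1500] + "\n\n[Content truncated for context efficiency...]"
--     return steps_content
-- ===== Notes on version B (the rewrite author's own statement) =====
-- stated objective: alternative
-- what changed: Replaces A's stateful line-by-line scan (current_section/current_content accumulators flushed at three sites) by a marker-to-marker jump scan: strip all lines once, locate each SECTION header, advance an index to the next marker, and render that slice directly.
import Mathlib
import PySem

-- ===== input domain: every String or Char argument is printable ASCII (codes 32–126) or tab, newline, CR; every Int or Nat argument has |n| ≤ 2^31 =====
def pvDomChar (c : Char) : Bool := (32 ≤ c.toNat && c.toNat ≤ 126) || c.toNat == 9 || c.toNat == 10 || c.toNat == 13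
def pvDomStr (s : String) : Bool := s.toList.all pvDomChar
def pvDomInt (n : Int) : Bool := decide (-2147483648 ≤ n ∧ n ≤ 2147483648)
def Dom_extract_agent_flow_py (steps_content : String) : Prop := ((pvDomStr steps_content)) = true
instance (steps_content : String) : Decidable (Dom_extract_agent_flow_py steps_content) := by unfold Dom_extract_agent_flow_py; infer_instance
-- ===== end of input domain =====

-- B replaces A's stateful line-by-line accumulator scan by a marker-to-marker jump scan over the
-- pre-stripped lines (find each section header, scan ahead to the next marker, render the slice);
-- objective "alternative" (no speed claim).
-- ===== PORT A =====

-- Python truthiness of 'current_section' (None or a string)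
def pvTruthySec (o : Option String) : Bool :=
  match o with
  | none => false
  | some s => !(s == "")

-- ' '.join(cc)[:200] + "..." if len(' '.join(cc)) > 200 else ' '.join(cc)
def pvASummary (cc : List String) : String :=
  let j := PySem.Str.join " " cc
  if 200 < PySem.Str.len j then PySem.Str.slice j none (some 200) ++ "..." else j

-- A's repeated 'if current_section and current_content: agent_interactions.append(f"{...}: {...}")'
def pvAFlush (acc : List String) (sec : Option String) (cc : List String) : List String :=
  if pvTruthySec sec && !cc.isEmpty then acc ++ [sec.getD "" ++ ": " ++ pvASummary cc] else acc

-- one iteration of A's 'for line in lines' over state (agent_interactions, current_section, current_content)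
def pvAStep (st : List String × Option String × List String) (line : String) :
    List String × Option String × List String :=
  -- A's Python re-evaluates line.strip() in each condition; inlined accordingly
  if PySem.Str.startswith (PySem.Str.strip line) "<!--- SECTION:" && PySem.Str.endswith (PySem.Str.strip line) "--->" then
    (pvAFlush st.1 st.2.1 st.2.2,
     some (PySem.Str.strip (PySem.Str.slice (PySem.Str.strip line) (some 14) (some (-4)))), [])
  else if PySem.Str.startswith (PySem.Str.strip line) "<!--- END SECTION:" then
    (pvAFlush st.1 st.2.1 st.2.2, none, [])
  else if pvTruthySec st.2.1 && !(PySem.Str.strip line == "") then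
    (st.1, st.2.1, st.2.2 ++ [PySem.Str.strip line])
  else st

def extract_agent_flow_py (steps_content : String) : String :=
  if steps_content == "" then "No conversation steps found"
  else
    -- split('\n'): sep is a non-empty literal, so PySem.Str.split? is always `some`; .getD [] is exact
    let lines := (PySem.Str.split? steps_content "\n").getD []
    let st := lines.foldl pvAStep ([], none, [])
    let agent_interactions := pvAFlush st.1 st.2.1 st.2.2
    if !agent_interactions.isEmpty then PySem.Str.join "\n" agent_interactions
    else if 1500 < PySem.Str.len steps_content then
      PySem.Str.slice steps_content none (some 1500) ++ "\n\n[Content truncated for context efficiency...]"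
    else steps_content

-- ===== PORT B =====

-- B's is_section(l)
def pvIsSection (l : String) : Bool :=
  PySem.Str.startswith l "<!--- SECTION:" && PySem.Str.endswith l "--->"

-- B's is_marker(l)
def pvIsMarker (l : String) : Bool :=
  pvIsSection l || PySem.Str.startswith l "<!--- END SECTION:"

-- B's inner 'while j < n and not is_marker(lines[j]): j += 1'
def pvFindMarker (lines : List String) (j : Nat) : Nat :=
  if h : j < lines.length then
    if pvIsMarker lines[j] then j else pvFindMarker lines (j + 1)
  else j
termination_by lines.length - j

-- termination fact the outer loop cites: the scan never moves backwards
theorem pvFindMarker_ge (lines : List String) (j : Nat) : j ≤ pvFindMarker lines j := by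
  fun_induction pvFindMarker lines j with
  | case1 => omega
  | case2 j h hm ih => omega
  | case3 => omega

-- B's outer 'while i < n' loop over (parts, i)
def pvBLoop (lines : List String) (i : Nat) (parts : List String) : List String :=
  if h : i < lines.length then
    if pvIsSection lines[i] then
      let name := PySem.Str.strip (PySem.Str.slice lines[i] (some 14) (some (-4)))
      let j := pvFindMarker lines (i + 1)
      -- lines[i+1:j]: Python list slice with natural bounds
      let body_lines := (PySem.List.slice lines (some ((i + 1 : Nat) : Int)) (some ((j : Nat) : Int))).filter (fun c => !(c == ""))
      let parts' :=
        if !(name == "") && !body_lines.isEmpty then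
          let body := PySem.Str.join " " body_lines
          parts ++ [name ++ ": " ++ (if 200 < PySem.Str.len body then PySem.Str.slice body none (some 200) ++ "..." else body)]
        else parts
      pvBLoop lines j parts'
    else pvBLoop lines (i + 1) parts
  else parts
termination_by lines.length - i
decreasing_by
  · have := pvFindMarker_ge lines (i + 1); omega
  · omega

def extract_agent_flow_py_alt (steps_content : String) : String :=
  if steps_content == "" then "No conversation steps found"
  else
    let lines := ((PySem.Str.split? steps_content "\n").getD []).map PySem.Str.strip
    let parts := pvBLoop lines 0 []
    if !parts.isEmpty then PySem.Str.join "\n" parts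
    else if 1500 < PySem.Str.len steps_content then
      PySem.Str.slice steps_content none (some 1500) ++ "\n\n[Content truncated for context efficiency...]"
    else steps_content

-- ===== PRECONDITION & SPEC =====
def Spec_extract_agent_flow_py (steps_content : String) (out : String) : Prop := out = extract_agent_flow_py_alt steps_content
instance (steps_content : String) (out : String) : Decidable (Spec_extract_agent_flow_py steps_content out) := by unfold Spec_extract_agent_flow_py; infer_instance

-- ===== CLAIM (what is proved, stated in full; the proofs are below) =====
def Claim_equal_extract_agent_flow_py : Prop := ∀ (steps_content : String), Dom_extract_agent_flow_py steps_content → Spec_extract_agent_flow_py steps_content (extract_agent_flow_py steps_content)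

-- ===== LEMMAS AND PROOFS =====

-- A's loop body with the line already stripped (pvAStep l = pvAStep' (strip l), proved below)
def pvAStep' (st : List String × Option String × List String) (l : String) :
    List String × Option String × List String :=
  if PySem.Str.startswith l "<!--- SECTION:" && PySem.Str.endswith l "--->" then
    (pvAFlush st.1 st.2.1 st.2.2,
     some (PySem.Str.strip (PySem.Str.slice l (some 14) (some (-4)))), [])
  else if PySem.Str.startswith l "<!--- END SECTION:" then
    (pvAFlush st.1 st.2.1 st.2.2, none, [])
  else if pvTruthySec st.2.1 && !(l == "") then
    (st.1, st.2.1, st.2.2 ++ [l])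
  else st

theorem pvAStep_strip (st : List String × Option String × List String) (l : String) :
    pvAStep st l = pvAStep' st (PySem.Str.strip l) := rfl

-- final 'if current_section and current_content' flush
def pvFinalize (st : List String × Option String × List String) : List String :=
  pvAFlush st.1 st.2.1 st.2.2

theorem pvAStep'_nosec (acc : List String) (l : String) (h : pvIsSection l = false) :
    pvAStep' (acc, none, []) l = (acc, none, []) := by
  unfold pvAStep' pvAFlush pvTruthySec pvIsSection at *
  split_ifs with h1 h2 h3 <;> simp_all

theorem pvAStep'_content (acc : List String) (name : String) (cc : List String) (l : String)
    (h : pvIsMarker l = false) :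
    pvAStep' (acc, some name, cc) l =
      (acc, some name, if !(name == "") && !(l == "") then cc ++ [l] else cc) := by
  unfold pvAStep' pvIsMarker pvIsSection at *
  split_ifs with h1 h2 h3 <;> simp_all [pvTruthySec]

theorem pvAStep'_marker (acc : List String) (name : String) (cc : List String) (m : String)
    (h : pvIsMarker m = true) :
    pvAStep' (acc, some name, cc) m = pvAStep' (pvAFlush acc (some name) cc, none, []) m := by
  unfold pvIsMarker pvIsSection at h
  unfold pvAStep'
  split_ifs with h1 h2 <;> simp_all [pvAFlush, pvTruthySec]

-- content stretch: folding A over non-marker lines just accumulates the (name-truthy) nonblank lines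
theorem pvContent (seg : List String) (h : ∀ l ∈ seg, pvIsMarker l = false)
    (rest : List String) (acc : List String) (name : String) (cc : List String) :
    List.foldl pvAStep' (acc, some name, cc) (seg ++ rest) =
      List.foldl pvAStep' (acc, some name,
        cc ++ (if name == "" then [] else seg.filter (fun c => !(c == "")))) rest := by
  induction seg generalizing cc with
  | nil => simp
  | cons l t ih =>
    have hl : pvIsMarker l = false := h l (by simp)
    have ht : ∀ x ∈ t, pvIsMarker x = false := fun x hx => h x (by simp [hx])
    simp only [List.cons_append, List.foldl_cons, pvAStep'_content acc name cc l hl]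
    rw [ih ht]
    by_cases hn : name == "" <;> by_cases hb : l == "" <;> simp_all

-- pvFindMarker stays within bounds and its stretch is marker-free, endpoint is a marker (if in range)
theorem pvFindMarker_le (lines : List String) (j : Nat) (h : j ≤ lines.length) :
    pvFindMarker lines j ≤ lines.length := by
  fun_induction pvFindMarker lines j with
  | case1 => omega
  | case2 j h' hm ih => exact ih (by omega)
  | case3 => omega

theorem pvFindMarker_endpoint (lines : List String) (j : Nat)
    (h : pvFindMarker lines j < lines.length) :
    pvIsMarker (lines[pvFindMarker lines j]'h) = true := by
  fun_induction pvFindMarker lines j with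
  | case1 j h' hm => exact hm
  | case2 j h' hm ih => exact ih _
  | case3 j h' => omega

theorem pvFindMarker_stretch (lines : List String) (j : Nat) :
    ∀ k (hk : k < lines.length), j ≤ k → k < pvFindMarker lines j →
      pvIsMarker (lines[k]'hk) = false := by
  fun_induction pvFindMarker lines j with
  | case1 j h' hm => intro k hk h1 h2; omega
  | case2 j h' hm ih =>
    intro k hk h1 h2
    rcases Nat.eq_or_lt_of_le h1 with rfl | h3
    · simpa using hm
    · exact ih k hk h3 h2
  | case3 j h' => intro k hk h1 h2; omega

-- the main invariant: A's residual fold (section closed) computes B's jump scan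
theorem pvMain (lines : List String) (n : Nat) :
    ∀ i acc, lines.length - i ≤ n →
      pvFinalize (List.foldl pvAStep' (acc, none, []) (lines.drop i)) = pvBLoop lines i acc := by
  induction n with
  | zero =>
    intro i acc h
    have hi : lines.length ≤ i := by omega
    rw [pvBLoop]
    simp [List.drop_eq_nil_of_le hi, pvFinalize, pvAFlush, pvTruthySec, Nat.not_lt_of_le hi]
  | succ n ih =>
    intro i acc h
    by_cases hi : i < lines.length
    · have hdrop : lines.drop i = lines[i] :: lines.drop (i + 1) := List.drop_eq_getElem_cons hi
      by_cases hs : pvIsSection lines[i]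
      · -- section header: A opens the section, B jumps to the next marker
        have hj1 : i + 1 ≤ pvFindMarker lines (i + 1) := pvFindMarker_ge lines (i + 1)
        have hj2 : pvFindMarker lines (i + 1) ≤ lines.length := pvFindMarker_le lines (i + 1) (by omega)
        have hmk := pvFindMarker_endpoint lines (i + 1)
        set j := pvFindMarker lines (i + 1) with hj
        clear_value j
        set name := PySem.Str.strip (PySem.Str.slice lines[i] (some 14) (some (-4))) with hname
        have hslice : PySem.List.slice lines (some ((i + 1 : Nat) : Int)) (some ((j : Nat) : Int)) =
            (lines.drop (i + 1)).take (j - (i + 1)) := PySem.List.slice_natCast ..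
        have hsplit : lines.drop (i + 1) =
            (lines.drop (i + 1)).take (j - (i + 1)) ++ lines.drop j := by
          conv_lhs => rw [← List.take_append_drop (j - (i + 1)) (lines.drop (i + 1))]
          rw [List.drop_drop]
          congr 2
          omega
        have hsegfree : ∀ l ∈ (lines.drop (i + 1)).take (j - (i + 1)), pvIsMarker l = false := by
          intro l hl
          rw [List.mem_iff_getElem] at hl
          obtain ⟨k, hk, rfl⟩ := hl
          have hk1 : k < j - (i + 1) := by
            have := hk; simp only [List.length_take, List.length_drop] at this; omega
          have hk2 : i + 1 + k < lines.length := by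
            simp only [List.length_take, List.length_drop] at hk; omega
          have : (List.take (j - (i + 1)) (List.drop (i + 1) lines))[k]'hk = lines[i + 1 + k]'hk2 := by
            simp [List.getElem_take, List.getElem_drop]
          rw [this]
          have hst := pvFindMarker_stretch lines (i + 1)
          rw [← hj] at hst
          exact hst (i + 1 + k) hk2 (by omega) (by omega)
        -- A's step on the header line
        have hstep : pvAStep' (acc, none, []) lines[i] = (acc, some name, []) := by
          unfold pvAStep' pvIsSection at *
          rw [if_pos hs]
          simp [pvAFlush, pvTruthySec, hname]
        -- the body collected by A on the stretch, and the part B emits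
        set bl := ((lines.drop (i + 1)).take (j - (i + 1))).filter (fun c => !(c == "")) with hbl
        set body := (if name == "" then ([] : List String) else bl) with hbody
        set parts' := (if !(name == "") && !bl.isEmpty then
            acc ++ [name ++ ": " ++ pvASummary bl] else acc) with hparts
        have hflush : pvAFlush acc (some name) body = parts' := by
          rw [hbody, hparts]
          by_cases hn : name == "" <;> simp [pvAFlush, pvTruthySec, hn]
        -- rewrite A's side into the post-stretch fold
        rw [hdrop, List.foldl_cons, hstep]
        conv_lhs => rw [hsplit]
        rw [pvContent _ hsegfree (lines.drop j) acc name [], List.nil_append, ← hbl, ← hbody]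
        -- unfold B one step
        rw [pvBLoop]
        simp only [dif_pos hi, if_pos hs, hslice, ← hname, ← hbl, ← hj]
        -- align B's recursive call accumulator with parts'
        have hacc : (if (!(name == "") && !bl.isEmpty) = true then
            acc ++ [name ++ ": " ++ (if 200 < PySem.Str.len (PySem.Str.join " " bl) then
              PySem.Str.slice (PySem.Str.join " " bl) none (some 200) ++ "..."
             else PySem.Str.join " " bl)] else acc) = parts' := by
          rw [hparts]; simp [pvASummary]
        rw [hacc, ← ih j parts' (by omega)]
        -- relate A's residual fold from (acc, some name, body) to one from (parts', none, [])
        by_cases hjl : j < lines.length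
        · have hdropj : lines.drop j = lines[j] :: lines.drop (j + 1) := List.drop_eq_getElem_cons hjl
          rw [hdropj, List.foldl_cons, List.foldl_cons,
            pvAStep'_marker acc name body lines[j] (hmk hjl), hflush]
        · have hnil : lines.drop j = [] := List.drop_eq_nil_of_le (by omega)
          rw [hnil]
          simp only [List.foldl_nil, pvFinalize]
          show pvAFlush acc (some name) body = pvAFlush parts' none []
          rw [hflush]
          simp [pvAFlush, pvTruthySec]
      · -- not a section header: A's state is unchanged, B advances by one
        rw [hdrop, List.foldl_cons, pvAStep'_nosec acc lines[i] (by simpa using hs),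
          ih (i + 1) acc (by omega)]
        conv_rhs => rw [pvBLoop, dif_pos hi, if_neg hs]
    · rw [pvBLoop]
      have : lines.drop i = [] := List.drop_eq_nil_of_le (by omega)
      rw [this]
      simp [pvFinalize, pvAFlush, pvTruthySec, hi]

-- ===== VERDICT (by name: the statement is the Claim_ definition above) =====
theorem extract_agent_flow_py_spec : Claim_equal_extract_agent_flow_py := by
  intro s _
  show extract_agent_flow_py s = extract_agent_flow_py_alt s
  unfold extract_agent_flow_py extract_agent_flow_py_alt
  by_cases hs : s == ""
  · simp only [hs, if_true]
  · simp only [hs, Bool.false_eq_true, if_false]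
    have hfold : ((PySem.Str.split? s "\n").getD []).foldl pvAStep ([], none, []) =
        (((PySem.Str.split? s "\n").getD []).map PySem.Str.strip).foldl pvAStep' ([], none, []) := by
      rw [List.foldl_map]
      simp only [← pvAStep_strip]
    have := pvMain (((PySem.Str.split? s "\n").getD []).map PySem.Str.strip)
      (((PySem.Str.split? s "\n").getD []).map PySem.Str.strip).length 0 [] (by omega)
    simp only [List.drop_zero] at this
    unfold pvFinalize at this
    rw [hfold, this]
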